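-- pv_equiv track=rewrite | github.com/SugarVei/NSGA-II-VNS-MOSA-1-19 | NSGA-II-VNS-MOSA-26-1-11-main/models/decoder.py | _assign_worker_indices
-- ===== SOURCE A (Python) =====
-- from typing import Dict, List, Tuple
-- from collections import defaultdict
--
-- def _assign_worker_indices(omega: Dict[Tuple[int, int], int]) -> Dict[Tuple[int, int], int]:
--     """给每个 (stage, machine) 分配该技能等级内部的 worker_idx（用于可视化与统计）。"""
--     by_skill = defaultdict(list)
--     for (j, f), w in omega.items():
--         by_skill[w].append((j, f))
--     worker_idx = {}
--     for w, machines in by_skill.items():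
--         machines_sorted = sorted(machines)
--         for k, key in enumerate(machines_sorted):
--             worker_idx[key] = k
--     return worker_idx
-- ===== SOURCE B (Python) =====
-- def _assign_worker_indices(omega):
--     """给每个 (stage, machine) 分配该技能等级内部的 worker_idx（用于可视化与统计）。"""
--     return {
--         key: k
--         for w in dict.fromkeys(omega.values())
--         for k, key in enumerate(sorted(key for key, skill in omega.items() if skill == w))
--     }
-- ===== Notes on version B (the rewrite author's own statement) =====
-- stated objective: simpler
-- what changed: Replaces the defaultdict bucket-building pass plus per-bucket loop by a single dict comprehension over the distinct skills (dict.fromkeys of the values), recomputing each skill's sorted key list by filtering omega.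
import Mathlib
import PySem

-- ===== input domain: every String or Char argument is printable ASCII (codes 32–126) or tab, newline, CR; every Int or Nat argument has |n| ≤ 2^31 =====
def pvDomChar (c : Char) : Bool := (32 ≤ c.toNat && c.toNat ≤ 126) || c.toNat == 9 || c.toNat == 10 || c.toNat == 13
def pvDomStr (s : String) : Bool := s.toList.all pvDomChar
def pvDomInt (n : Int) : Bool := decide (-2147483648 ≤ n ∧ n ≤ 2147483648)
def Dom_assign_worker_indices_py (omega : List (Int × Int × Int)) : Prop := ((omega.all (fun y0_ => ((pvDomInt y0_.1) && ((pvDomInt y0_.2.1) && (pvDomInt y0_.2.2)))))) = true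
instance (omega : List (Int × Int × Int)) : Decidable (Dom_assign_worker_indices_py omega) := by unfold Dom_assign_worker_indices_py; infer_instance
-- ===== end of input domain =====

-- B replaces A's defaultdict-of-buckets pass plus per-bucket loop by a single dict
-- comprehension over the distinct skills (dict.fromkeys), rescanning omega per skill
-- (objective: simpler). The dict argument omega is an association list of ((j, f), w) triples.

-- ===== PORT A =====
def assign_worker_indices_py (omega : List (Int × Int × Int)) : List (Int × Int × Int) :=
  let by_skill : PySem.Dict Int (List (Int × Int)) :=
    omega.foldl (fun d p => d.modify p.2.2 [] (fun ms => ms ++ [(p.1, p.2.1)])) PySem.Dict.empty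
  let worker_idx : PySem.Dict (Int × Int) Int :=
    by_skill.items.foldl (fun d g =>
      (PySem.List.enumerate (PySem.List.sorted2 g.2 (fun m => m.1) (fun m => m.2)) 0).foldl
        (fun d e => d.insert e.2 e.1) d) PySem.Dict.empty
  worker_idx.items.map (fun q => (q.1.1, q.1.2, q.2))

-- ===== PORT B =====
-- dict.fromkeys(omega.values()) = PySem.List.dedup; the dict comprehension's double loop is
-- the fold of insert over the flattened (skill, enumerated-sorted-keys) stream
def assign_worker_indices_py_alt (omega : List (Int × Int × Int)) : List (Int × Int × Int) :=
  (((PySem.List.dedup (omega.map (fun p => p.2.2))).flatMap (fun w =>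
      PySem.List.enumerate
        (PySem.List.sorted2 ((omega.filter (fun p => p.2.2 == w)).map (fun p => (p.1, p.2.1)))
          (fun m => m.1) (fun m => m.2)) 0)).foldl
      (fun (d : PySem.Dict (Int × Int) Int) e => d.insert e.2 e.1) PySem.Dict.empty).items.map
    (fun q => (q.1.1, q.1.2, q.2))

-- ===== PRECONDITION & SPEC =====
def Spec_assign_worker_indices_py (omega : List (Int × Int × Int)) (out : List (Int × Int × Int)) : Prop := out = assign_worker_indices_py_alt omega
instance (omega : List (Int × Int × Int)) (out : List (Int × Int × Int)) : Decidable (Spec_assign_worker_indices_py omega out) := by unfold Spec_assign_worker_indices_py; infer_instance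

-- ===== CLAIM (what is proved, stated in full; the proofs are below) =====
def Claim_equal_assign_worker_indices_py : Prop := ∀ (omega : List (Int × Int × Int)), Dom_assign_worker_indices_py omega → Spec_assign_worker_indices_py omega (assign_worker_indices_py omega)

-- ===== LEMMAS AND PROOFS =====

-- A's by_skill dict: keys are the distinct skills in first-seen order, each bucket is the
-- filtered (stage, machine) list — exactly what B recomputes per skill.
theorem pv_by_skill_items (omega : List (Int × Int × Int)) :
    (omega.foldl (fun d p => d.modify p.2.2 [] (fun ms => ms ++ [(p.1, p.2.1)]))
        (PySem.Dict.empty : PySem.Dict Int (List (Int × Int)))).items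
      = (PySem.Set.ofList (omega.map (fun p => p.2.2))).map
          (fun w => (w, (omega.filter (fun p => p.2.2 == w)).map (fun p => (p.1, p.2.1)))) := by
  have hkeys : (omega.foldl (fun d p => d.modify p.2.2 [] (fun ms => ms ++ [(p.1, p.2.1)]))
      (PySem.Dict.empty : PySem.Dict Int (List (Int × Int)))).keys
        = PySem.Set.ofList (omega.map (fun p => p.2.2)) := by
    have := PySem.Dict.keys_foldl_modify_key omega (fun p => p.2.2) ([] : List (Int × Int))
      (fun _ p => fun ms => ms ++ [(p.1, p.2.1)]) PySem.Dict.empty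
    simpa [PySem.Dict.keys_empty, PySem.Set.ofList_eq_foldl, PySem.Set.update] using this
  have hnd : (omega.foldl (fun d p => d.modify p.2.2 [] (fun ms => ms ++ [(p.1, p.2.1)]))
      (PySem.Dict.empty : PySem.Dict Int (List (Int × Int)))).keys.Nodup := by
    refine PySem.Dict.nodup_keys_foldl_modify_key omega (fun p => p.2.2) _
      (fun _ p => fun ms => ms ++ [(p.1, p.2.1)]) PySem.Dict.empty ?_
    simp [PySem.Dict.keys_empty]
  have hgetD : ∀ c : Int, (omega.foldl (fun d p => d.modify p.2.2 [] (fun ms => ms ++ [(p.1, p.2.1)]))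
      (PySem.Dict.empty : PySem.Dict Int (List (Int × Int)))).getD c []
        = (omega.filter (fun p => p.2.2 == c)).map (fun p => (p.1, p.2.1)) := by
    intro c
    have hfold : (omega.foldl (fun d p => d.modify p.2.2 [] (fun ms => ms ++ [(p.1, p.2.1)]))
        (PySem.Dict.empty : PySem.Dict Int (List (Int × Int))))
        = ((omega.map (fun p => (p.2.2, (p.1, p.2.1)))).foldl
            (fun d q => d.modify q.1 [] (fun ms => ms ++ [q.2])) PySem.Dict.empty) := by
      rw [List.foldl_map]
    rw [hfold, PySem.Dict.getD_foldl_modify_append]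
    simp [List.filter_map, Function.comp_def]
  rw [PySem.Dict.items_eq_map_keys _ hnd ([] : List (Int × Int)), hkeys]
  exact List.map_congr_left (fun w _ => by rw [hgetD w])

-- folding an insert over the flattened stream = folding the inner loop per skill
theorem pv_foldl_flatMap {α β γ : Type} (f : α → List β) (g : γ → β → γ) (l : List α) :
    ∀ (init : γ), (l.flatMap f).foldl g init = l.foldl (fun acc x => (f x).foldl g acc) init := by
  induction l with
  | nil => intro init; simp
  | cons x xs ih => intro init; simp [List.foldl_append, ih]

-- ===== VERDICT (by name: the statement is the Claim_ definition above) =====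
theorem assign_worker_indices_py_spec : Claim_equal_assign_worker_indices_py := by
  intro omega _
  unfold Spec_assign_worker_indices_py assign_worker_indices_py assign_worker_indices_py_alt
  dsimp only []
  rw [pv_by_skill_items, PySem.List.dedup_eq_ofList, pv_foldl_flatMap, List.foldl_map]
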